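-- pv_equiv track=rewrite | github.com/ssuumm96/Algorithm | Programers/test1.py | solution
-- ===== SOURCE A (Python) =====
-- def solution(id_list, k):
--     answer = 0
--     array = []
--     d = {}
--
--     for i in id_list:
--         id = i.split()
--         id_not = list(set(id))
--         for x in id_not:
--             if d.get(x,0) < k:
--                 d[x] = d.get(x,0) +1
--
--     return sum(d.values())
-- ===== SOURCE B (Python) =====
-- def solution(id_list, k):
--     tokens = sorted(t for line in id_list for t in set(line.split()))
--     total = 0
--     run = 0
--     prev = None
--     for t in tokens:
--         if t != prev:
--             total += max(min(run, k), 0)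
--             run = 0
--             prev = t
--         run += 1
--     return total + max(min(run, k), 0)
-- ===== Notes on version B (the rewrite author's own statement) =====
-- stated objective: alternative
-- what changed: B uses no dictionary at all: it flattens the per-line deduplicated tokens into one list, sorts it, and computes the answer with a single run-length scan over the sorted list, capping each run at k; A builds a dict with a capped conditional increment per token.
import Mathlib
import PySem

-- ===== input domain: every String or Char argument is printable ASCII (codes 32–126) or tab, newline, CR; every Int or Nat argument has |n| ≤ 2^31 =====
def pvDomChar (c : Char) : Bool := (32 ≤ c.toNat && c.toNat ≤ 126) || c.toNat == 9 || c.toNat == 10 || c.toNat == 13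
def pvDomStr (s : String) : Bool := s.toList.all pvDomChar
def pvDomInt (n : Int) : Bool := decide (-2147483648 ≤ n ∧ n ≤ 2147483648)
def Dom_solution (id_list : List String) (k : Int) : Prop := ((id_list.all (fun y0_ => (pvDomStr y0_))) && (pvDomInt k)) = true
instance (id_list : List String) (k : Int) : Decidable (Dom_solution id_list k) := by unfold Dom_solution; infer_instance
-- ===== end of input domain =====

-- B replaces A's dict of capped per-token counts by flatten + sort + one run-length scan over the
-- sorted token list (no dictionary at all): a different algorithm of similar cost ("alternative").

-- ===== PORT A =====
def solution (id_list : List String) (k : Int) : Int :=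
  -- answer = 0 and array = [] in A are dead code
  let d : PySem.Dict String Int :=
    id_list.foldl (fun d i =>
      let id := PySem.Str.split₀ i
      let id_not : PySem.Set String := PySem.Set.ofList id
      id_not.foldl (fun d x =>
        if d.getD x 0 < k then d.insert x (d.getD x 0 + 1) else d) d)
      PySem.Dict.empty
  d.values.sum

-- ===== PORT B =====
-- sorted(...) over the per-line sets is order-safe: sorting forgets the sets' iteration order
def solution_alt (id_list : List String) (k : Int) : Int :=
  let tokens : List String :=
    PySem.List.sorted (id_list.flatMap (fun line => PySem.Set.ofList (PySem.Str.split₀ line)))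
      (fun t => t)
  let st : Int × Int × Option String :=
    tokens.foldl (fun (s : Int × Int × Option String) t =>
      let s' := if some t ≠ s.2.2 then (s.1 + max (min s.2.1 k) 0, (0 : Int), some t) else s
      (s'.1, s'.2.1 + 1, s'.2.2)) ((0 : Int), (0 : Int), (none : Option String))
  st.1 + max (min st.2.1 k) 0

-- ===== PRECONDITION & SPEC =====
def Spec_solution (id_list : List String) (k : Int) (out : Int) : Prop := out = solution_alt id_list k
instance (id_list : List String) (k : Int) (out : Int) : Decidable (Spec_solution id_list k out) := by unfold Spec_solution; infer_instance

-- ===== CLAIM (what is proved, stated in full; the proofs are below) =====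
def Claim_equal_solution : Prop := ∀ (id_list : List String) (k : Int), Dom_solution id_list k → Spec_solution id_list k (solution id_list k)

-- ===== LEMMAS AND PROOFS =====

-- clamp of a count to [0, k]
def pvClamp (k v : Int) : Int := max (min v k) 0

-- A's per-token step; the uncapped counter step; B's scan step
def pvStepA (k : Int) (d : PySem.Dict String Int) (x : String) : PySem.Dict String Int :=
  if d.getD x 0 < k then d.insert x (d.getD x 0 + 1) else d

def pvStepB (c : PySem.Dict String Int) (x : String) : PySem.Dict String Int :=
  c.insert x (c.getD x 0 + 1)

def pvScanStep (k : Int) (s : Int × Int × Option String) (t : String) : Int × Int × Option String :=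
  let s' := if some t ≠ s.2.2 then (s.1 + max (min s.2.1 k) 0, (0 : Int), some t) else s
  (s'.1, s'.2.1 + 1, s'.2.2)

def pvFin (k : Int) (st : Int × Int × Option String) : Int := st.1 + pvClamp k st.2.1

def pvScanTot (k : Int) (s : List String) (st : Int × Int × Option String) : Int :=
  pvFin k (s.foldl (pvScanStep k) st)

-- ---------- dedup structure ----------

theorem pvSetAdd_cons (s : List String) (x y : String) (h : y ≠ x) :
    PySem.Set.add (x :: s) y = x :: PySem.Set.add s y := by
  simp [PySem.Set.add, PySem.Set.contains, h]
  split_ifs <;> rfl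

theorem pvFoldlAdd_cons (l : List String) : ∀ (acc : List String) (t : String), t ∉ l →
    l.foldl PySem.Set.add (t :: acc) = t :: l.foldl PySem.Set.add acc := by
  induction l with
  | nil => intro acc t _; rfl
  | cons y ys ih =>
    intro acc t ht
    have hy : y ≠ t := fun h => ht (h ▸ List.mem_cons_self)
    have ht' : t ∉ ys := fun h => ht (List.mem_cons_of_mem _ h)
    simp only [List.foldl_cons, pvSetAdd_cons acc t y hy]
    exact ih _ t ht'

theorem pvFoldlAdd_filter (l : List String) : ∀ (acc : List String) (t : String), t ∈ acc →
    l.foldl PySem.Set.add acc = (l.filter (fun x => decide (x ≠ t))).foldl PySem.Set.add acc := by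
  induction l with
  | nil => intro acc t _; rfl
  | cons y ys ih =>
    intro acc t ht
    by_cases hy : y = t
    · subst hy
      have hadd : PySem.Set.add acc y = acc := by
        simp [PySem.Set.add, PySem.Set.contains, ht]
      have hfil : List.filter (fun x => decide (x ≠ y)) (y :: ys)
          = List.filter (fun x => decide (x ≠ y)) ys := by simp
      rw [hfil, List.foldl_cons, hadd]
      exact ih acc y ht
    · have hmem : t ∈ PySem.Set.add acc y := by
        simp [PySem.Set.add]
        split_ifs with h
        · exact ht
        · exact List.mem_append_left _ ht
      have hfil : List.filter (fun x => decide (x ≠ t)) (y :: ys)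
          = y :: List.filter (fun x => decide (x ≠ t)) ys := by simp [hy]
      rw [hfil, List.foldl_cons, List.foldl_cons]
      exact ih _ t hmem

theorem pvDedup_cons (t : String) (ts : List String) :
    PySem.List.dedup (t :: ts) = t :: PySem.List.dedup (ts.filter (fun x => decide (x ≠ t))) := by
  have htf : t ∉ ts.filter (fun x => decide (x ≠ t)) := by
    intro h
    have := List.of_mem_filter h
    simp at this
  calc PySem.List.dedup (t :: ts)
      = (t :: ts).foldl PySem.Set.add [] := by
        rw [PySem.List.dedup_eq_ofList, PySem.Set.ofList_eq_foldl]
    _ = ts.foldl PySem.Set.add [t] := by rfl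
    _ = (ts.filter (fun x => decide (x ≠ t))).foldl PySem.Set.add [t] :=
        pvFoldlAdd_filter ts [t] t List.mem_cons_self
    _ = t :: (ts.filter (fun x => decide (x ≠ t))).foldl PySem.Set.add [] :=
        pvFoldlAdd_cons _ [] t htf
    _ = t :: PySem.List.dedup (ts.filter (fun x => decide (x ≠ t))) := by
        rw [PySem.List.dedup_eq_ofList, PySem.Set.ofList_eq_foldl]

theorem pvSum_cons (k : Int) (t : String) (ts : List String) :
    ((PySem.List.dedup (t :: ts)).map (fun x => pvClamp k (((t :: ts).count x : Nat) : Int))).sum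
      = pvClamp k (1 + (ts.count t : Int))
        + ((PySem.List.dedup (ts.filter (fun x => decide (x ≠ t)))).map
            (fun x => pvClamp k ((ts.count x : Nat) : Int))).sum := by
  rw [pvDedup_cons]
  simp only [List.map_cons, List.sum_cons]
  congr 1
  · have hc : ((List.count t (t :: ts) : Nat) : Int) = 1 + ((List.count t ts : Nat) : Int) := by
      rw [List.count_cons_self]; push_cast; ring
    rw [hc]
  · apply congrArg List.sum
    apply List.map_congr_left
    intro x hx
    have hxt : x ≠ t := by
      have := List.of_mem_filter ((PySem.List.mem_dedup _ _).1 hx)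
      simpa using this
    have hc : List.count x (t :: ts) = List.count x ts := by
      simp [Ne.symm hxt]
    rw [hc]

-- ---------- the run-length scan on a sorted list ----------

theorem pvScan_run (k : Int) : ∀ (s : List String), s.Pairwise (· ≤ ·) →
    ∀ (p : String) (total run : Int), (∀ x ∈ s, p ≤ x) →
    pvScanTot k s (total, run, some p)
      = total + pvClamp k (run + (s.count p : Int))
        + ((PySem.List.dedup (s.filter (fun x => decide (x ≠ p)))).map
            (fun x => pvClamp k ((s.count x : Nat) : Int))).sum := by
  intro s
  induction s with
  | nil =>
    intro _ p total run _
    simp [pvScanTot, pvFin, PySem.List.dedup, PySem.Set.ofList]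
  | cons t ts ih =>
    intro hs p total run hle
    have hts : ts.Pairwise (· ≤ ·) := hs.of_cons
    have htle : ∀ x ∈ ts, t ≤ x := (List.pairwise_cons.1 hs).1
    by_cases htp : t = p
    · subst htp
      have hstep : pvScanStep k (total, run, some t) t = (total, run + 1, some t) := by
        simp [pvScanStep]
      have hfold : pvScanTot k (t :: ts) (total, run, some t)
          = pvScanTot k ts (total, run + 1, some t) := by
        simp only [pvScanTot, List.foldl_cons, hstep]
      rw [hfold, ih hts t total (run + 1) htle]
      congr 1
      · have hc2 : run + ((List.count t (t :: ts) : Nat) : Int)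
            = run + 1 + ((List.count t ts : Nat) : Int) := by
          rw [List.count_cons_self]; push_cast; ring
        rw [hc2]
      · apply congrArg List.sum
        have hfil : List.filter (fun x => decide (x ≠ t)) (t :: ts)
            = List.filter (fun x => decide (x ≠ t)) ts := by simp
        rw [hfil]
        apply List.map_congr_left
        intro x hx
        have hxt : x ≠ t := by
          have := List.of_mem_filter ((PySem.List.mem_dedup _ _).1 hx)
          simpa using this
        have hc : List.count x (t :: ts) = List.count x ts := by
          simp [Ne.symm hxt]
        rw [hc]
    · have hpt : p < t := lt_of_le_of_ne (hle t List.mem_cons_self) (Ne.symm htp)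
      have hplt : ∀ x ∈ t :: ts, p < x := by
        intro x hx
        rcases List.mem_cons.1 hx with h | h
        · exact h ▸ hpt
        · exact lt_of_lt_of_le hpt (htle x h)
      have hpnot : p ∉ t :: ts := fun h => lt_irrefl p (hplt p h)
      have hstep : pvScanStep k (total, run, some p) t
          = (total + pvClamp k run, 1, some t) := by
        simp [pvScanStep, pvClamp, htp]
      have hfold : pvScanTot k (t :: ts) (total, run, some p)
          = pvScanTot k ts (total + pvClamp k run, 1, some t) := by
        simp only [pvScanTot, List.foldl_cons, hstep]
      rw [hfold, ih hts t (total + pvClamp k run) 1 htle]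
      have hcnt0 : (t :: ts).count p = 0 := List.count_eq_zero.2 hpnot
      have hfilt : (t :: ts).filter (fun x => decide (x ≠ p)) = t :: ts := by
        apply List.filter_eq_self.2
        intro x hx
        simp [ne_of_gt (hplt x hx)]
      rw [hcnt0, hfilt, pvSum_cons k t ts]
      have hr0 : run + (((0 : Nat) : Int)) = run := by push_cast; ring
      rw [hr0]
      ring
-- ---------- A's capped dict vs the uncapped counter ----------

def pvInv (k : Int) (d c : PySem.Dict String Int) : Prop :=
  d.keys = c.keys ∧ (∀ x, d.getD x 0 = min (c.getD x 0) k) ∧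
  (∀ x, 0 ≤ c.getD x 0) ∧ c.keys.Nodup

theorem pvInv_step (k : Int) (hk : 0 < k) (d c : PySem.Dict String Int) (x : String)
    (h : pvInv k d c) : pvInv k (pvStepA k d x) (pvStepB c x) := by
  obtain ⟨hkeys, hval, hpos, hnd⟩ := h
  have hvx := hval x
  have hpx := hpos x
  have hcont : d.contains x = c.contains x := by
    by_cases hm : x ∈ c.keys
    · rw [(PySem.Dict.contains_iff_mem_keys _ _).2 (hkeys ▸ hm), (PySem.Dict.contains_iff_mem_keys _ _).2 hm]
    · have h1 : d.contains x = false := by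
        by_contra hc
        exact hm (hkeys ▸ (PySem.Dict.contains_iff_mem_keys _ _).1 (by simpa using hc))
      have h2 : c.contains x = false := by
        by_contra hc
        exact hm ((PySem.Dict.contains_iff_mem_keys _ _).1 (by simpa using hc))
      rw [h1, h2]
  by_cases hlt : c.getD x 0 < k
  · have hdlt : d.getD x 0 < k := by rw [hvx]; omega
    refine ⟨?_, ?_, ?_, ?_⟩
    · unfold pvStepA pvStepB
      rw [if_pos hdlt]
      by_cases hc : c.contains x = true
      · rw [PySem.Dict.keys_insert_of_contains _ _ (hcont ▸ hc),
            PySem.Dict.keys_insert_of_contains _ _ hc, hkeys]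
      · have hc' : c.contains x = false := by simpa using hc
        rw [PySem.Dict.keys_insert_of_not_contains _ _ (hcont ▸ hc'),
            PySem.Dict.keys_insert_of_not_contains _ _ hc', hkeys]
    · intro y
      unfold pvStepA pvStepB
      rw [if_pos hdlt, PySem.Dict.getD_insert, PySem.Dict.getD_insert]
      by_cases hy : y = x
      · rw [if_pos hy, if_pos hy, hvx]; omega
      · rw [if_neg hy, if_neg hy]; exact hval y
    · intro y
      unfold pvStepB
      rw [PySem.Dict.getD_insert]
      by_cases hy : y = x
      · rw [if_pos hy]; omega
      · rw [if_neg hy]; exact hpos y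
    · unfold pvStepB
      exact PySem.Dict.nodup_keys_insert _ _ _ hnd
  · have hdge : ¬ d.getD x 0 < k := by rw [hvx]; omega
    have hcx : c.contains x = true := by
      by_contra hc
      have : c.getD x 0 = 0 :=
        PySem.Dict.getD_of_not_contains _ _ (by simpa using hc)
      omega
    refine ⟨?_, ?_, ?_, ?_⟩
    · unfold pvStepA pvStepB
      rw [if_neg hdge, PySem.Dict.keys_insert_of_contains _ _ hcx, hkeys]
    · intro y
      unfold pvStepA pvStepB
      rw [if_neg hdge, PySem.Dict.getD_insert]
      by_cases hy : y = x
      · rw [if_pos hy, hy, hvx]; omega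
      · rw [if_neg hy]; exact hval y
    · intro y
      unfold pvStepB
      rw [PySem.Dict.getD_insert]
      by_cases hy : y = x
      · rw [if_pos hy]; omega
      · rw [if_neg hy]; exact hpos y
    · unfold pvStepB
      exact PySem.Dict.nodup_keys_insert _ _ _ hnd

theorem pvInv_foldl (k : Int) (hk : 0 < k) (l : List String) (d c : PySem.Dict String Int)
    (h : pvInv k d c) : pvInv k (l.foldl (pvStepA k) d) (l.foldl pvStepB c) := by
  induction l generalizing d c with
  | nil => exact h
  | cons x xs ih => exact ih _ _ (pvInv_step k hk d c x h)

theorem pvInv_empty (k : Int) (hk : 0 < k) : pvInv k PySem.Dict.empty PySem.Dict.empty := by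
  refine ⟨rfl, ?_, ?_, ?_⟩
  · intro x; rw [PySem.Dict.getD_empty]; omega
  · intro x; rw [PySem.Dict.getD_empty]
  · simp [PySem.Dict.empty]

theorem pvA_empty_of_nonpos (k : Int) (hk : ¬ 0 < k) (l : List String) :
    l.foldl (pvStepA k) PySem.Dict.empty = PySem.Dict.empty := by
  induction l with
  | nil => rfl
  | cons x xs ih =>
    have : pvStepA k PySem.Dict.empty x = PySem.Dict.empty := by
      unfold pvStepA
      rw [PySem.Dict.getD_empty, if_neg (by omega)]
    simpa [List.foldl_cons, this] using ih

theorem pvA_eq (k : Int) (l : List String) :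
    (l.foldl (pvStepA k) PySem.Dict.empty).values.sum
      = ((PySem.List.dedup l).map (fun x => pvClamp k ((l.count x : Nat) : Int))).sum := by
  by_cases hk : 0 < k
  · obtain ⟨hkeys, hval, hpos, hnd⟩ := pvInv_foldl k hk l _ _ (pvInv_empty k hk)
    have hrw : l.foldl pvStepB PySem.Dict.empty
        = l.foldl (fun d x => d.insert x (d.getD x 0 + 1)) PySem.Dict.empty := rfl
    have hckeys : (l.foldl pvStepB PySem.Dict.empty).keys = PySem.List.dedup l := by
      rw [hrw,PySem.Dict.keys_foldl_insert l (fun d x => d.getD x 0 + 1),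
          PySem.List.dedup_eq_ofList, PySem.Set.ofList_eq_foldl]
      rfl
    have hcget : ∀ x, (l.foldl pvStepB PySem.Dict.empty).getD x 0 = ((l.count x : Nat) : Int) := by
      intro x
      rw [hrw,PySem.Dict.getD_foldl_insert_add_one l PySem.Dict.empty x, PySem.Dict.getD_empty]
      ring
    rw [PySem.Dict.values_eq_map_keys _ (hkeys ▸ hnd) 0, hkeys, hckeys]
    apply congrArg List.sum
    apply List.map_congr_left
    intro x _
    rw [hval x, hcget x]
    have hnn : (0 : Int) ≤ ((l.count x : Nat) : Int) := Int.natCast_nonneg _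
    simp only [pvClamp]
    omega
  · rw [pvA_empty_of_nonpos k hk l]
    have hz : ∀ v ∈ ((PySem.List.dedup l).map (fun x => pvClamp k ((l.count x : Nat) : Int))), v = 0 := by
      intro v hv
      obtain ⟨w, _, hw⟩ := List.mem_map.1 hv
      simp only [pvClamp] at hw
      omega
    rw [List.sum_eq_zero hz]
    rfl

-- ---------- B's sorted scan equals the same sum ----------

theorem pvScan_sorted (k : Int) (s : List String) (hs : s.Pairwise (· ≤ ·)) :
    pvScanTot k s ((0 : Int), (0 : Int), (none : Option String))
      = ((PySem.List.dedup s).map (fun x => pvClamp k ((s.count x : Nat) : Int))).sum := by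
  cases s with
  | nil => simp [pvScanTot, pvFin, pvClamp, PySem.List.dedup, PySem.Set.ofList]
  | cons t ts =>
    have hts : ts.Pairwise (· ≤ ·) := hs.of_cons
    have htle : ∀ x ∈ ts, t ≤ x := (List.pairwise_cons.1 hs).1
    have hstep : pvScanStep k ((0 : Int), (0 : Int), (none : Option String)) t
        = ((0 : Int) + pvClamp k 0, 1, some t) := by
      simp [pvScanStep, pvClamp]
    have hc0 : pvClamp k 0 = 0 := by simp [pvClamp]
    have hfold : pvScanTot k (t :: ts) ((0 : Int), (0 : Int), (none : Option String))
        = pvScanTot k ts (0, 1, some t) := by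
      simp only [pvScanTot, List.foldl_cons, hstep, hc0, add_zero]
    rw [hfold, pvScan_run k ts hts t 0 1 htle, pvSum_cons k t ts]
    ring

theorem pvB_eq (k : Int) (T : List String) :
    pvScanTot k (PySem.List.sorted T (fun t => t)) ((0 : Int), (0 : Int), (none : Option String))
      = ((PySem.List.dedup T).map (fun x => pvClamp k ((T.count x : Nat) : Int))).sum := by
  set s := PySem.List.sorted T (fun t => t) with hsdef
  have hperm : s.Perm T := PySem.List.sorted_perm T (fun t => t) false
  have hpw : s.Pairwise (· ≤ ·) := by
    have := PySem.List.sorted_pairwise T (fun t => t)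
    simpa using this
  rw [pvScan_sorted k s hpw]
  have hcnt : ∀ x, s.count x = T.count x := fun x => hperm.count_eq x
  have h1 : ((PySem.List.dedup s).map (fun x => pvClamp k ((s.count x : Nat) : Int)))
      = ((PySem.List.dedup s).map (fun x => pvClamp k ((T.count x : Nat) : Int))) := by
    apply List.map_congr_left
    intro x _
    rw [hcnt x]
  rw [h1]
  have hdperm : (PySem.List.dedup s).Perm (PySem.List.dedup T) := by
    rw [List.perm_ext_iff_of_nodup (PySem.List.nodup_dedup s) (PySem.List.nodup_dedup T)]
    intro x
    rw [PySem.List.mem_dedup, PySem.List.mem_dedup]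
    exact hperm.mem_iff
  exact (hdperm.map _).sum_eq

-- ---------- assembly ----------

theorem pvA_val (id_list : List String) (k : Int) :
    solution id_list k
      = ((PySem.List.dedup (id_list.flatMap (fun line => PySem.Set.ofList (PySem.Str.split₀ line)))).map
          (fun x => pvClamp k (((id_list.flatMap (fun line => PySem.Set.ofList (PySem.Str.split₀ line))).count x : Nat) : Int))).sum := by
  show (id_list.foldl (fun d i => (PySem.Set.ofList (PySem.Str.split₀ i)).foldl (pvStepA k) d)
          PySem.Dict.empty).values.sum = _
  rw [← List.foldl_flatMap]
  exact pvA_eq k _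

theorem pvB_val (id_list : List String) (k : Int) :
    solution_alt id_list k
      = ((PySem.List.dedup (id_list.flatMap (fun line => PySem.Set.ofList (PySem.Str.split₀ line)))).map
          (fun x => pvClamp k (((id_list.flatMap (fun line => PySem.Set.ofList (PySem.Str.split₀ line))).count x : Nat) : Int))).sum := by
  show pvFin k ((PySem.List.sorted (id_list.flatMap (fun line => PySem.Set.ofList (PySem.Str.split₀ line))) (fun t => t)).foldl
        (pvScanStep k) ((0 : Int), (0 : Int), (none : Option String))) = _
  exact pvB_eq k _

-- ===== VERDICT =====
theorem solution_spec : Claim_equal_solution := by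
  intro id_list k _
  unfold Spec_solution
  rw [pvA_val id_list k, pvB_val id_list k]
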